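-- pv_equiv track=rewrite | github.com/donmatthiuz/Laboratorios_Teoria_Computacion- | Lab3/Ejercicio1/shuntingYard.py | format_to_based_expression
-- ===== SOURCE A (Python) =====
-- def format_to_based_expression(regex):
--     res = ""
--     stack = []
--     i = 0
--
--     while i < len(regex):
--         character = regex[i]
--
--         if character == "[":
--             # Manejar los corchetes como un bloque
--             block = ""
--             while i < len(regex) and regex[i] != "]":
--                 block += regex[i]
--                 i += 1
--             block += "]"  # Añadir el cierre del bloque
--             stack.append(block)
--
--         elif character == "+":
--             if stack:
--                 last = stack.pop()
--                 stack.append(f"({last}{last}*)")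
--
--         elif character == "?":
--             if stack:
--                 last = stack.pop()
--                 stack.append(f"({last}|ε)")
--
--         else:
--             stack.append(character)
--
--         i += 1
--
--     res = "".join(stack)
--     return res
-- ===== SOURCE B (Python) =====
-- def _tokenize(regex):
--     """One pass: '[...]' blocks (closed or not, always ending with ']') become one token,
--     every other character its own token."""
--     tokens = []
--     i = 0
--     n = len(regex)
--     while i < n:
--         if regex[i] == "[":
--             j = regex.find("]", i)
--             if j == -1:
--                 tokens.append(regex[i:] + "]")
--                 i = n
--             else:
--                 tokens.append(regex[i:j] + "]")
--                 i = j + 1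
--         else:
--             tokens.append(regex[i])
--             i += 1
--     return tokens
--
--
-- def format_to_based_expression(regex):
--     out = []
--     for t in _tokenize(regex):
--         if t == "+":
--             if out:
--                 out[-1] = f"({out[-1]}{out[-1]}*)"
--         elif t == "?":
--             if out:
--                 out[-1] = f"({out[-1]}|\u03b5)"
--         else:
--             out.append(t)
--     return "".join(out)
-- ===== Notes on version B (the rewrite author's own statement) =====
-- stated objective: alternative
-- what changed: A interleaves bracket-block collection and +/? stack rewriting in one index-driven while loop; B first tokenizes the regex into block/character tokens in one pass, then folds over the token list applying +/? to the last output element.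
import Mathlib
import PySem

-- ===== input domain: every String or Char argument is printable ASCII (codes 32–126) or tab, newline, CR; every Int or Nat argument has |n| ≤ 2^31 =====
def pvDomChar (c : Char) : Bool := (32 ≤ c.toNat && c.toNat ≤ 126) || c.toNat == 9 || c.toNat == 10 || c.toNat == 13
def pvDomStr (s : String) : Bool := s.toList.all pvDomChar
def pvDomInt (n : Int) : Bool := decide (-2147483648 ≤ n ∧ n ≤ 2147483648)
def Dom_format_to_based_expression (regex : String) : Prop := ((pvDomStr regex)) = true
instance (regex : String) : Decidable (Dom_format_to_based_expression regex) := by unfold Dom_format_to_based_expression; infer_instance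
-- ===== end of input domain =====

-- B replaces A's single interleaved index-driven stack loop by two passes — a tokenizer
-- producing '[...]' block tokens and single-char tokens, then a fold applying +/? to the
-- last output element (objective: alternative decomposition, same return value).

-- ===== PORT A =====
-- A's outer while over index i, transcribed as recursion over the remaining characters;
-- the inner while collecting a '[...]' block is the takeWhile/dropWhile of the same chars,
-- and the outer i += 1 after the block is the 'drop 1' skipping the ']'.
def pvAloop (cs : List Char) (stack : List String) : List String :=
  match cs with
  | [] => stack
  | c :: rest =>
    if c = '[' then
      let block := String.ofList ('[' :: rest.takeWhile (· ≠ ']') ++ [']'])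
      pvAloop ((rest.dropWhile (· ≠ ']')).drop 1) (stack ++ [block])
    else if c = '+' then
      match stack.getLast? with
      | some last => pvAloop rest (stack.dropLast ++ ["(" ++ last ++ last ++ "*)"])
      | none => pvAloop rest stack
    else if c = '?' then
      match stack.getLast? with
      | some last => pvAloop rest (stack.dropLast ++ ["(" ++ last ++ "|ε)"])
      | none => pvAloop rest stack
    else
      pvAloop rest (stack ++ [String.ofList [c]])
termination_by cs.length
decreasing_by
  · simp only [List.length_drop, List.length_cons]
    have h := List.length_dropWhile_le (p := fun x : Char => decide (x ≠ ']')) (l := rest)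
    omega
  all_goals simp

def format_to_based_expression (regex : String) : String :=
  String.join (pvAloop regex.toList [])

-- ===== PORT B =====
-- Source B's _tokenize: '[' opens a block token running up to (and always including) ']';
-- any other character is its own token.
def pvTokenize (cs : List Char) : List String :=
  match cs with
  | [] => []
  | c :: rest =>
    if c = '[' then
      String.ofList ('[' :: rest.takeWhile (· ≠ ']') ++ [']'])
        :: pvTokenize ((rest.dropWhile (· ≠ ']')).drop 1)
    else
      String.ofList [c] :: pvTokenize rest
termination_by cs.length
decreasing_by
  · simp only [List.length_drop, List.length_cons]
    have h := List.length_dropWhile_le (p := fun x : Char => decide (x ≠ ']')) (l := rest)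
    omega
  all_goals simp

-- Source B's for-loop body over one token
def pvStep (out : List String) (t : String) : List String :=
  if t = "+" then
    match out.getLast? with
    | some last => out.dropLast ++ ["(" ++ last ++ last ++ "*)"]
    | none => out
  else if t = "?" then
    match out.getLast? with
    | some last => out.dropLast ++ ["(" ++ last ++ "|ε)"]
    | none => out
  else
    out ++ [t]

def format_to_based_expression_alt (regex : String) : String :=
  String.join ((pvTokenize regex.toList).foldl pvStep [])

-- ===== PRECONDITION & SPEC =====
def Spec_format_to_based_expression (regex : String) (out : String) : Prop := out = format_to_based_expression_alt regex
instance (regex : String) (out : String) : Decidable (Spec_format_to_based_expression regex out) := by unfold Spec_format_to_based_expression; infer_instance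

-- ===== CLAIM (what is proved, stated in full; the proofs are below) =====
def Claim_equal_format_to_based_expression : Prop := ∀ (regex : String), Dom_format_to_based_expression regex → Spec_format_to_based_expression regex (format_to_based_expression regex)

-- ===== LEMMAS AND PROOFS =====

theorem pvStep_notop (st : List String) (t : String) (h1 : t ≠ "+") (h2 : t ≠ "?") :
    pvStep st t = st ++ [t] := by
  unfold pvStep; rw [if_neg h1, if_neg h2]

theorem pvAloop_eq_fold (cs : List Char) (st : List String) :
    pvAloop cs st = (pvTokenize cs).foldl pvStep st := by
  fun_induction pvAloop cs st
  case case1 => simp [pvTokenize]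
  case case2 st rest block ih =>
    have e1 : String.ofList ('[' :: rest.takeWhile (· ≠ ']') ++ [']']) ≠ "+" := by
      intro h; have := congrArg String.toList h; simp at this
    have e2 : String.ofList ('[' :: rest.takeWhile (· ≠ ']') ++ [']']) ≠ "?" := by
      intro h; have := congrArg String.toList h; simp at this
    rw [pvTokenize]
    simp only [if_true, List.foldl_cons]
    rw [pvStep_notop st _ e1 e2]
    exact ih
  case case3 st rest last hl h ih =>
    rw [pvTokenize, if_neg h, List.foldl_cons,
        show String.ofList ['+'] = "+" from rfl]
    unfold pvStep
    rw [if_pos rfl]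
    simp only [hl]
    exact ih
  case case4 st rest hl h ih =>
    rw [pvTokenize, if_neg h, List.foldl_cons,
        show String.ofList ['+'] = "+" from rfl]
    unfold pvStep
    rw [if_pos rfl]
    simp only [hl]
    exact ih
  case case5 st rest last hl h1 h2 ih =>
    rw [pvTokenize, if_neg h1, List.foldl_cons,
        show String.ofList ['?'] = "?" from rfl]
    unfold pvStep
    rw [if_neg (by decide), if_pos rfl]
    simp only [hl]
    exact ih
  case case6 st rest hl h1 h2 ih =>
    rw [pvTokenize, if_neg h1, List.foldl_cons,
        show String.ofList ['?'] = "?" from rfl]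
    unfold pvStep
    rw [if_neg (by decide), if_pos rfl]
    simp only [hl]
    exact ih
  case case7 st c rest h1 h2 h3 ih =>
    have e1 : String.ofList [c] ≠ "+" := by
      intro h; have := congrArg String.toList h; simp at this; exact h2 this
    have e2 : String.ofList [c] ≠ "?" := by
      intro h; have := congrArg String.toList h; simp at this; exact h3 this
    rw [pvTokenize, if_neg h1, List.foldl_cons, pvStep_notop st _ e1 e2]
    exact ih

-- ===== VERDICT (by name: the statement is the Claim_ definition above) =====
theorem format_to_based_expression_spec : Claim_equal_format_to_based_expression := by
  intro regex _
  unfold Spec_format_to_based_expression format_to_based_expression format_to_based_expression_alt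
  rw [pvAloop_eq_fold]
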